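-- pv_equiv track=rewrite | github.com/eniallator/Python-Steganography | app.py | create_header_bin
-- ===== SOURCE A (Python) =====
-- from math import ceil
--
-- HEADER_BIN_INTERVAL = 15
--
-- def dec_to_bin(num):
--     bin_num = []
--     while num > 0:
--         bin_num.append(num % 2)
--         num = num // 2
--
--     return bin_num
--
-- def resize_bin(bin_num, length):
--     return [bin_num[i] if i < len(bin_num) else 0 for i in range(length)]
--
-- def create_header_bin(num):
--     bin_num = dec_to_bin(num)
--     working_bin = resize_bin(bin_num, ceil(len(bin_num) / HEADER_BIN_INTERVAL) * HEADER_BIN_INTERVAL)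
--     header_bin = []
--     for i in range(ceil(len(working_bin) / HEADER_BIN_INTERVAL)):
--         if header_bin != []:
--             header_bin.append(1)
--         header_bin += working_bin[i * HEADER_BIN_INTERVAL: (i + 1) * HEADER_BIN_INTERVAL]
--     header_bin.append(0)
--     return header_bin
-- ===== SOURCE B (Python) =====
-- HEADER_BIN_INTERVAL = 15
--
-- def create_header_bin(num):
--     # Process the integer directly in 15-bit groups: no padded bit list, no slicing.
--     chunks = []
--     while num > 0:
--         g = num % (1 << HEADER_BIN_INTERVAL)
--         chunk = []
--         for _ in range(HEADER_BIN_INTERVAL):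
--             chunk.append(g % 2)
--             g //= 2
--         chunks.append(chunk)
--         num >>= HEADER_BIN_INTERVAL
--     header_bin = []
--     for chunk in chunks:
--         if header_bin:
--             header_bin.append(1)
--         header_bin += chunk
--     header_bin.append(0)
--     return header_bin
-- ===== Notes on version B (the rewrite author's own statement) =====
-- stated objective: alternative
-- what changed: B consumes the integer directly, masking off and shifting away one interval-sized group of bits at a time and emitting each full group as a ready chunk, instead of materializing the whole little-endian bit list, zero-padding it to a multiple of the interval and slicing it back into chunks.
import Mathlib
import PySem

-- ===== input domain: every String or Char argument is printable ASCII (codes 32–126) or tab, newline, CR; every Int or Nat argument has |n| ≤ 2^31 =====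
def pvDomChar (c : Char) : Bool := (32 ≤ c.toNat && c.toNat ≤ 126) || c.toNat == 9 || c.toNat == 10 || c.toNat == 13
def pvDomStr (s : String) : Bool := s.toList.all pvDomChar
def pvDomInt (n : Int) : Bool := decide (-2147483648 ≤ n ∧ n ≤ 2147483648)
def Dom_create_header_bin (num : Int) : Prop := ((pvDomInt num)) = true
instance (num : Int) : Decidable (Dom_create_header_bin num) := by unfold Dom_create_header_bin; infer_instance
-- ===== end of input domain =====

-- B re-implements the header builder chunk-by-chunk on the integer (15 bits at a time, no
-- materialized padded bit list and no slicing); same values, similar cost ('alternative').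

-- ===== PORT A =====
-- while num > 0: bin_num.append(num % 2); num //= 2   (appending in order builds this cons list)
def dec_to_bin (num : Int) : List Int :=
  if _h : 0 < num then PySem.Int.mod num 2 :: dec_to_bin (PySem.Int.floordiv num 2) else []
termination_by num.toNat
decreasing_by rw [PySem.Int.floordiv_eq_ediv_of_pos (by omega : (0:Int) < 2)]; omega

def resize_bin (bin_num : List Int) (length : Nat) : List Int :=
  (List.range length).map (fun i => if i < bin_num.length then bin_num.getD i 0 else 0)

-- math.ceil(x / 15) for a nonnegative int x is exactly (x + 14) / 15 in Nat division.
def create_header_bin (num : Int) : List Int :=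
  let bin_num := dec_to_bin num
  let working_bin := resize_bin bin_num (((bin_num.length + 14) / 15) * 15)
  let header_bin :=
    (List.range ((working_bin.length + 14) / 15)).foldl
      (fun hb i =>
        (if hb ≠ [] then hb ++ [1] else hb) ++
          PySem.List.slice working_bin (some ((i * 15 : Nat) : Int)) (some (((i + 1) * 15 : Nat) : Int)))
      []
  header_bin ++ [0]

-- ===== PORT B =====
-- for _ in range(15): chunk.append(g % 2); g //= 2
def chb_chunk (g : Int) (k : Nat) : List Int :=
  match k with
  | 0 => []
  | k + 1 => PySem.Int.mod g 2 :: chb_chunk (PySem.Int.floordiv g 2) k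

-- while num > 0: chunks.append(chunk of num % (1 << 15)); num >>= 15
-- (num >>= 15 for num > 0 is exact floor division by 32768)
def chb_chunks (num : Int) : List (List Int) :=
  if _h : 0 < num then
    chb_chunk (PySem.Int.mod num 32768) 15 :: chb_chunks (PySem.Int.floordiv num 32768)
  else []
termination_by num.toNat
decreasing_by rw [PySem.Int.floordiv_eq_ediv_of_pos (by omega : (0:Int) < 32768)]; omega

def create_header_bin_alt (num : Int) : List Int :=
  ((chb_chunks num).foldl (fun hb c => (if hb ≠ [] then hb ++ [1] else hb) ++ c) []) ++ [0]

-- ===== PRECONDITION & SPEC =====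
def Spec_create_header_bin (num : Int) (out : List Int) : Prop := out = create_header_bin_alt num
instance (num : Int) (out : List Int) : Decidable (Spec_create_header_bin num out) := by unfold Spec_create_header_bin; infer_instance

-- ===== CLAIM (what is proved, stated in full; the proofs are below) =====
def Claim_equal_create_header_bin : Prop := ∀ (num : Int), Dom_create_header_bin num → Spec_create_header_bin num (create_header_bin num)

-- ===== LEMMAS AND PROOFS =====

/-- bit i of a natural number, as the Int digit both programs produce. -/
def bitI (n i : Nat) : Int := if n.testBit i then 1 else 0

theorem dec_to_bin_getD (n : Nat) : ∀ i, (dec_to_bin (n : Int)).getD i 0 = bitI n i := by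
  induction n using Nat.strong_induction_on with
  | _ n ih =>
    intro i
    by_cases h : 0 < n
    · rw [dec_to_bin, dif_pos (by exact_mod_cast h : (0:Int) < (n:Int))]
      have hm : PySem.Int.mod (n:Int) 2 = ((n % 2 : Nat) : Int) := by
        exact_mod_cast PySem.Int.mod_natCast n 2
      have hd : PySem.Int.floordiv (n:Int) 2 = ((n / 2 : Nat) : Int) := by
        exact_mod_cast PySem.Int.floordiv_natCast n 2
      rw [hm, hd]
      cases i with
      | zero =>
        simp only [List.getD_cons_zero, bitI, Nat.testBit_zero]
        have h2 : n % 2 = 0 ∨ n % 2 = 1 := by omega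
        rcases h2 with h2 | h2 <;> simp [h2]
      | succ i =>
        simp only [List.getD_cons_succ]
        rw [ih (n / 2) (by omega) i]
        simp [bitI, Nat.testBit_add_one]
    · have hn : n = 0 := by omega
      subst hn
      rw [dec_to_bin, dif_neg (by norm_num)]
      simp [bitI]

theorem dec_to_bin_len_le (n : Nat) : ∀ k, (dec_to_bin (n : Int)).length ≤ k ↔ n < 2 ^ k := by
  induction n using Nat.strong_induction_on with
  | _ n ih =>
    intro k
    by_cases h : 0 < n
    · rw [dec_to_bin, dif_pos (by exact_mod_cast h : (0:Int) < (n:Int))]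
      have hd : PySem.Int.floordiv (n:Int) 2 = ((n / 2 : Nat) : Int) := by
        exact_mod_cast PySem.Int.floordiv_natCast n 2
      rw [hd]
      cases k with
      | zero =>
        simp only [List.length_cons, pow_zero]
        omega
      | succ k =>
        rw [List.length_cons, Nat.add_le_add_iff_right, ih (n / 2) (by omega) k,
          pow_succ]
        constructor
        · intro hlt
          have := (Nat.div_lt_iff_lt_mul (by norm_num : 0 < 2)).mp hlt
          omega
        · intro hlt
          exact (Nat.div_lt_iff_lt_mul (by norm_num : 0 < 2)).mpr (by omega)
    · have hn : n = 0 := by omega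
      subst hn
      rw [dec_to_bin, dif_neg (by norm_num)]
      simp

theorem chb_chunk_length (g : Int) (k : Nat) : (chb_chunk g k).length = k := by
  induction k generalizing g with
  | zero => rfl
  | succ k ih => simp [chb_chunk, ih]

theorem chb_chunk_getD (k : Nat) : ∀ (m i : Nat), i < k → (chb_chunk (m : Int) k).getD i 0 = bitI m i := by
  induction k with
  | zero => intro m i hi; omega
  | succ k ih =>
    intro m i hi
    rw [chb_chunk]
    have hm : PySem.Int.mod (m:Int) 2 = ((m % 2 : Nat) : Int) := by
      exact_mod_cast PySem.Int.mod_natCast m 2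
    have hd : PySem.Int.floordiv (m:Int) 2 = ((m / 2 : Nat) : Int) := by
      exact_mod_cast PySem.Int.floordiv_natCast m 2
    rw [hm, hd]
    cases i with
    | zero =>
      simp only [List.getD_cons_zero, bitI, Nat.testBit_zero]
      have h2 : m % 2 = 0 ∨ m % 2 = 1 := by omega
      rcases h2 with h2 | h2 <;> simp [h2]
    | succ i =>
      simp only [List.getD_cons_succ]
      rw [ih (m / 2) i (by omega)]
      simp [bitI, Nat.testBit_add_one]

theorem chb_chunks_mem_length (num : Int) : ∀ c ∈ chb_chunks num, c.length = 15 := by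
  induction num using chb_chunks.induct with
  | case1 num h ih =>
    rw [chb_chunks, dif_pos h]
    intro c hc
    rcases List.mem_cons.mp hc with rfl | hc
    · exact chb_chunk_length _ _
    · exact ih c hc
  | case2 num h =>
    rw [chb_chunks, dif_neg h]
    simp

theorem dec_to_bin_len_shift (n : Nat) (h : 2 ^ 15 ≤ n) :
    (dec_to_bin (n : Int)).length = (dec_to_bin ((n / 2 ^ 15 : Nat) : Int)).length + 15 := by
  set L := (dec_to_bin ((n / 2 ^ 15 : Nat) : Int)).length with hL
  have hdivpos : 0 < n / 2 ^ 15 := Nat.div_pos h (by norm_num)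
  have hLpos : 0 < L := by
    by_contra hc
    have h0 := (dec_to_bin_len_le (n / 2 ^ 15) 0).mp (by omega)
    simp only [pow_zero] at h0
    omega
  have hub : n / 2 ^ 15 < 2 ^ L := (dec_to_bin_len_le _ L).mp le_rfl
  apply le_antisymm
  · rw [dec_to_bin_len_le, pow_add]
    exact (Nat.div_lt_iff_lt_mul (by norm_num : 0 < 2 ^ 15)).mp hub
  · by_contra hc
    push Not at hc
    have hle : (dec_to_bin (n:Int)).length ≤ L + 14 := by omega
    have hnlt := (dec_to_bin_len_le n (L + 14)).mp hle
    have hsplit : L + 14 = (L - 1) + 15 := by omega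
    rw [hsplit, pow_add] at hnlt
    have hdlt : n / 2 ^ 15 < 2 ^ (L - 1) :=
      (Nat.div_lt_iff_lt_mul (by norm_num : 0 < 2 ^ 15)).mpr hnlt
    have := (dec_to_bin_len_le (n / 2 ^ 15) (L - 1)).mpr hdlt
    omega

theorem chb_chunks_count (n : Nat) :
    (chb_chunks (n : Int)).length = ((dec_to_bin (n : Int)).length + 14) / 15 := by
  induction n using Nat.strong_induction_on with
  | _ n ih =>
    by_cases h : 0 < n
    · rw [chb_chunks, dif_pos (by exact_mod_cast h : (0:Int) < (n:Int))]
      have hd : PySem.Int.floordiv (n:Int) 32768 = ((n / 32768 : Nat) : Int) := by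
        exact_mod_cast PySem.Int.floordiv_natCast n 32768
      rw [hd]
      by_cases h2 : n < 2 ^ 15
      · have hz : n / 32768 = 0 := by
          have : (2:Nat) ^ 15 = 32768 := by norm_num
          omega
        rw [hz]
        rw [show ((0:Nat):Int) = (0:Int) by norm_num, chb_chunks, dif_neg (by norm_num)]
        have hub := (dec_to_bin_len_le n 15).mpr h2
        have hlb : ¬ (dec_to_bin (n:Int)).length ≤ 0 := by
          rw [dec_to_bin_len_le]
          simp only [pow_zero]
          omega
        simp only [List.length_cons, List.length_nil]
        omega
      · push Not at h2
        rw [List.length_cons, ih (n / 32768) (by omega)]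
        rw [show (32768:Nat) = 2 ^ 15 by norm_num] at *
        rw [dec_to_bin_len_shift n h2]
        omega
    · have hn : n = 0 := by omega
      subst hn
      rw [chb_chunks, dif_neg (by norm_num), dec_to_bin, dif_neg (by norm_num)]
      simp

theorem flatten_len15 (l : List (List Int)) (h : ∀ c ∈ l, c.length = 15) :
    l.flatten.length = 15 * l.length := by
  induction l with
  | nil => simp
  | cons c cs ih =>
    simp only [List.flatten_cons, List.length_append, List.length_cons,
      h c (List.mem_cons_self ..), ih (fun x hx => h x (List.mem_cons_of_mem _ hx))]
    ring

theorem chb_chunks_flatten_getD (n : Nat) :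
    ∀ i, i < 15 * (chb_chunks (n : Int)).length →
      ((chb_chunks (n : Int)).flatten).getD i 0 = bitI n i := by
  induction n using Nat.strong_induction_on with
  | _ n ih =>
    intro i hi
    by_cases h : 0 < n
    · rw [chb_chunks, dif_pos (by exact_mod_cast h : (0:Int) < (n:Int))] at hi ⊢
      have hm : PySem.Int.mod (n:Int) 32768 = ((n % 32768 : Nat) : Int) := by
        exact_mod_cast PySem.Int.mod_natCast n 32768
      have hd : PySem.Int.floordiv (n:Int) 32768 = ((n / 32768 : Nat) : Int) := by
        exact_mod_cast PySem.Int.floordiv_natCast n 32768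
      rw [hm, hd] at hi ⊢
      rw [List.flatten_cons]
      by_cases hi15 : i < 15
      · rw [List.getD_append _ _ _ _ (by rw [chb_chunk_length]; omega)]
        rw [chb_chunk_getD 15 (n % 32768) i hi15]
        simp only [bitI]
        rw [show (32768:Nat) = 2 ^ 15 by norm_num, Nat.testBit_mod_two_pow]
        simp [hi15]
      · push Not at hi15
        rw [List.getD_append_right _ _ 0 i (by rw [chb_chunk_length]; omega), chb_chunk_length]
        rw [List.length_cons] at hi
        rw [ih (n / 32768) (by omega) (i - 15) (by omega)]
        simp only [bitI]
        rw [show (32768:Nat) = 2 ^ 15 by norm_num, Nat.testBit_div_two_pow,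
          show i - 15 + 15 = i from by omega]
    · have hn : n = 0 := by omega
      subst hn
      rw [chb_chunks, dif_neg (by norm_num)] at hi
      simp at hi

theorem working_eq_flatten (n : Nat) :
    resize_bin (dec_to_bin (n : Int)) ((((dec_to_bin (n : Int)).length + 14) / 15) * 15)
      = (chb_chunks (n : Int)).flatten := by
  have hcnt := chb_chunks_count n
  have hflen := flatten_len15 _ (chb_chunks_mem_length ((n:Nat):Int))
  apply List.ext_getElem
  · simp only [resize_bin, List.length_map, List.length_range, hflen, hcnt]
    ring
  · intro i h1 h2
    simp only [resize_bin, List.length_map, List.length_range] at h1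
    simp only [resize_bin, List.getElem_map, List.getElem_range]
    rw [← List.getD_eq_getElem _ 0 h2]
    rw [chb_chunks_flatten_getD n i (by rw [← hcnt] at h1; omega)]
    by_cases hlen : i < (dec_to_bin (n:Int)).length
    · rw [if_pos hlen, dec_to_bin_getD n i]
    · rw [if_neg hlen]
      have hbig : n < 2 ^ i := (dec_to_bin_len_le n i).mp (by omega)
      simp [bitI, Nat.testBit_lt_two_pow hbig]

theorem foldA_aux (l : List (List Int)) (h15 : ∀ c ∈ l, c.length = 15) :
    ∀ acc : List Int, acc ≠ [] →
      (List.range l.length).foldl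
        (fun hb i => (if hb ≠ [] then hb ++ [1] else hb) ++ ((l.flatten.drop (i * 15)).take 15)) acc
      = acc ++ l.flatMap (fun c => 1 :: c) := by
  induction l with
  | nil => intro acc hacc; simp
  | cons ch rest ih =>
    intro acc hacc
    have hch : ch.length = 15 := h15 ch (List.mem_cons_self ..)
    rw [List.length_cons, List.range_succ_eq_map, List.foldl_cons, List.foldl_map]
    have hstep0 : (if acc ≠ [] then acc ++ [1] else acc) ++
        (((ch :: rest).flatten.drop (0 * 15)).take 15) = (acc ++ [1]) ++ ch := by
      rw [if_pos hacc]
      simp only [Nat.zero_mul, List.drop_zero, List.flatten_cons]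
      rw [← hch, List.take_left]
    rw [hstep0]
    rw [List.foldl_ext _ _ _
      (fun hb i _ => by
        show _ = (if hb ≠ [] then hb ++ [1] else hb) ++ ((rest.flatten.drop (i * 15)).take 15)
        congr 2
        rw [List.flatten_cons, show (Nat.succ i) * 15 = ch.length + i * 15 by omega,
          List.drop_length_add_append])]
    rw [ih (fun c hc => h15 c (List.mem_cons_of_mem _ hc)) ((acc ++ [1]) ++ ch) (by simp)]
    simp [List.flatMap_cons]

theorem foldB_aux (l : List (List Int)) :
    ∀ acc : List Int, acc ≠ [] →
      l.foldl (fun hb c => (if hb ≠ [] then hb ++ [1] else hb) ++ c) acc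
      = acc ++ l.flatMap (fun c => 1 :: c) := by
  induction l with
  | nil => intro acc hacc; simp
  | cons ch rest ih =>
    intro acc hacc
    rw [List.foldl_cons, if_pos hacc, ih ((acc ++ [1]) ++ ch) (by simp)]
    simp [List.flatMap_cons]

theorem foldA_top (l : List (List Int)) (h15 : ∀ c ∈ l, c.length = 15) :
    (List.range l.length).foldl
      (fun hb i => (if hb ≠ [] then hb ++ [1] else hb) ++ ((l.flatten.drop (i * 15)).take 15)) []
    = (l.flatMap (fun c => 1 :: c)).tail := by
  cases l with
  | nil => simp
  | cons ch rest =>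
    have hch : ch.length = 15 := h15 ch (List.mem_cons_self ..)
    rw [List.length_cons, List.range_succ_eq_map, List.foldl_cons, List.foldl_map]
    have hstep0 : (if ([] : List Int) ≠ [] then ([] : List Int) ++ [1] else []) ++
        (((ch :: rest).flatten.drop (0 * 15)).take 15) = ch := by
      rw [if_neg (by simp)]
      simp only [Nat.zero_mul, List.drop_zero, List.flatten_cons, List.nil_append]
      rw [← hch, List.take_left]
    rw [hstep0]
    rw [List.foldl_ext _ _ _
      (fun hb i _ => by
        show _ = (if hb ≠ [] then hb ++ [1] else hb) ++ ((rest.flatten.drop (i * 15)).take 15)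
        congr 2
        rw [List.flatten_cons, show (Nat.succ i) * 15 = ch.length + i * 15 by omega,
          List.drop_length_add_append])]
    rw [foldA_aux rest (fun c hc => h15 c (List.mem_cons_of_mem _ hc)) ch
      (by intro hce; rw [hce] at hch; simp at hch)]
    simp [List.flatMap_cons]

theorem foldB_top (l : List (List Int)) (h15 : ∀ c ∈ l, c.length = 15) :
    l.foldl (fun hb c => (if hb ≠ [] then hb ++ [1] else hb) ++ c) []
    = (l.flatMap (fun c => 1 :: c)).tail := by
  cases l with
  | nil => simp
  | cons ch rest =>
    have hch : ch.length = 15 := h15 ch (List.mem_cons_self ..)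
    rw [List.foldl_cons, if_neg (by simp), List.nil_append]
    rw [foldB_aux rest ch (by intro hce; rw [hce] at hch; simp at hch)]
    simp [List.flatMap_cons]

-- ===== VERDICT (by name: the statement is the Claim_ definition above) =====
theorem create_header_bin_spec : Claim_equal_create_header_bin := by
  intro num _
  unfold Spec_create_header_bin
  by_cases h : 0 < num
  · obtain ⟨n, rfl⟩ : ∃ n : Nat, num = (n : Int) :=
      ⟨num.toNat, (Int.toNat_of_nonneg (by omega)).symm⟩
    have h15 := chb_chunks_mem_length ((n : Nat) : Int)
    have hcnt := chb_chunks_count n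
    have hflen := flatten_len15 _ h15
    simp only [create_header_bin, create_header_bin_alt]
    rw [working_eq_flatten n, hflen, hcnt,
      show (15 * (((dec_to_bin ((n : Nat) : Int)).length + 14) / 15) + 14) / 15
          = ((dec_to_bin ((n : Nat) : Int)).length + 14) / 15 from by omega,
      ← hcnt]
    rw [List.foldl_ext _ _ _
      (fun hb i _ => by
        show _ = (if hb ≠ [] then hb ++ [1] else hb) ++
          (((chb_chunks ((n : Nat) : Int)).flatten.drop (i * 15)).take 15)
        congr 1
        rw [PySem.List.slice_natCast]
        congr 1
        omega)]
    rw [foldA_top _ h15, foldB_top _ h15]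
  · simp only [create_header_bin, create_header_bin_alt]
    rw [dec_to_bin, dif_neg h, chb_chunks, dif_neg h]
    simp [resize_bin]
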